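-- pv_equiv track=rewrite | github.com/pmahajan3105/bt_agent | scripts/insight_new_stage_pipeline_lib.py | _mentions_buyer_gap
-- ===== SOURCE A (Python) =====
-- def _mentions_buyer_gap(text: str) -> bool:
--     t = text.lower()
--     phrases = [
--         "no buyers connected",
--         "no connected buyer",
--         "no connected buyers",
--         "buyers identified but no",
--         "buyer identified but no",
--         "0 connected",
--         "none connected",
--         "no connections",
--         "no warm path",
--     ]
--     return any(p in t for p in phrases)
-- ===== SOURCE B (Python) =====
-- _GAP_PHRASES = (
--     "no buyers connected",
--     "no connected buyer",
--     "no connected buyers",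
--     "buyers identified but no",
--     "buyer identified but no",
--     "0 connected",
--     "none connected",
--     "no connections",
--     "no warm path",
-- )
--
--
-- def _mentions_buyer_gap(text: str) -> bool:
--     # One left-to-right pass over the text: at each position, test whether
--     # any gap phrase starts there (instead of one full substring scan per phrase).
--     t = text.lower()
--     i = 0
--     n = len(t)
--     while i < n:
--         if any(t.startswith(p, i) for p in _GAP_PHRASES):
--             return True
--         i += 1
--     return False
-- ===== Notes on version B (the rewrite author's own statement) =====
-- stated objective: alternative
-- what changed: Replaces A's phrase-by-phrase substring scans (any(p in t)) with a single position-driven left-to-right pass that tests at each index whether some phrase starts there.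
import Mathlib
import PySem

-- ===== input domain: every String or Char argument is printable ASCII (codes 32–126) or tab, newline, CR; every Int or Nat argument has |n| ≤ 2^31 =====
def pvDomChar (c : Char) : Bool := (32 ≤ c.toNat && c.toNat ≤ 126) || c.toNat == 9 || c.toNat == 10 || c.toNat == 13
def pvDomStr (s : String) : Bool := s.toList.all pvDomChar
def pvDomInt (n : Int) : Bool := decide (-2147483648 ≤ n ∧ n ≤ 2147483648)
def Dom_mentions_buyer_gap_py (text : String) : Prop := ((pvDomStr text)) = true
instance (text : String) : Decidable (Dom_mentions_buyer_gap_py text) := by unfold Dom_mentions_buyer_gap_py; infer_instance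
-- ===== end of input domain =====

-- B replaces A's phrase-by-phrase substring scans with one position-driven pass
-- testing at each index whether some phrase starts there (alternative, same cost).

-- ===== PORT A =====
def gapPhrases : List String :=
  [ "no buyers connected"
  , "no connected buyer"
  , "no connected buyers"
  , "buyers identified but no"
  , "buyer identified but no"
  , "0 connected"
  , "none connected"
  , "no connections"
  , "no warm path" ]

def mentions_buyer_gap_py (text : String) : Bool :=
  let t := PySem.Str.lower text
  gapPhrases.any (fun p => PySem.Str.isIn p t)

-- ===== PORT B =====
def gapPhrasesChars : List (List Char) := gapPhrases.map String.toList

-- the while loop of Source B: advance the position i by one = recurse on the suffix;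
-- 't.startswith(p, i)' (0 ≤ i) is exactly 'startswith (t.drop i) p', the current suffix
def gapScan (phrases : List (List Char)) : List Char → Bool
  | [] => false
  | c :: rest => phrases.any (fun p => PySem.Chars.startswith (c :: rest) p) || gapScan phrases rest

def mentions_buyer_gap_py_alt (text : String) : Bool :=
  gapScan gapPhrasesChars (PySem.Chars.lower text.toList)

-- ===== PRECONDITION & SPEC =====
def Spec_mentions_buyer_gap_py (text : String) (out : Bool) : Prop := out = mentions_buyer_gap_py_alt text
instance (text : String) (out : Bool) : Decidable (Spec_mentions_buyer_gap_py text out) := by unfold Spec_mentions_buyer_gap_py; infer_instance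

-- ===== CLAIM (what is proved, stated in full; the proofs are below) =====
def Claim_equal_mentions_buyer_gap_py : Prop := ∀ (text : String), Dom_mentions_buyer_gap_py text → Spec_mentions_buyer_gap_py text (mentions_buyer_gap_py text)

-- ===== LEMMAS AND PROOFS =====

lemma gapScan_iff (phrases : List (List Char)) (t : List Char) :
    gapScan phrases t = true ↔ ∃ p ∈ phrases, ∃ j, j < t.length ∧ p <+: t.drop j := by
  induction t with
  | nil => simp [gapScan]
  | cons c rest ih =>
    simp only [gapScan, Bool.or_eq_true, List.any_eq_true, PySem.Chars.startswith_iff, ih]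
    constructor
    · rintro (⟨p, hp, hpre⟩ | ⟨p, hp, j, hj, hpre⟩)
      · exact ⟨p, hp, 0, by simp, by simpa using hpre⟩
      · exact ⟨p, hp, j + 1, by simpa using hj, by simpa using hpre⟩
    · rintro ⟨p, hp, j, hj, hpre⟩
      cases j with
      | zero => exact Or.inl ⟨p, hp, by simpa using hpre⟩
      | succ j => exact Or.inr ⟨p, hp, j, by simpa using hj, by simpa using hpre⟩

lemma isIn_eq_exists (p t : List Char) (hp : p ≠ []) :
    PySem.Chars.isIn p t = true ↔ ∃ j, j < t.length ∧ p <+: t.drop j := by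
  rw [← PySem.Chars.exists_prefix_drop_iff_isIn]
  constructor
  · rintro ⟨j, hpre⟩
    by_cases hj : j < t.length
    · exact ⟨j, hj, hpre⟩
    · exfalso
      rw [List.drop_eq_nil_of_le (by omega)] at hpre
      exact hp (List.prefix_nil.mp hpre)
  · rintro ⟨j, _, hpre⟩; exact ⟨j, hpre⟩

theorem mentions_buyer_gap_py_eq (text : String) :
    mentions_buyer_gap_py text = mentions_buyer_gap_py_alt text := by
  unfold mentions_buyer_gap_py mentions_buyer_gap_py_alt
  set L := PySem.Chars.lower text.toList with hL
  have hlower : (PySem.Str.lower text).toList = L := by simp [hL]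
  rw [Bool.eq_iff_iff, List.any_eq_true, gapScan_iff]
  constructor
  · rintro ⟨p, hp, hin⟩
    have hin' : PySem.Chars.isIn p.toList L = true := by
      rw [← hlower]; simpa [PySem.Str.isIn] using hin
    have hpne : p.toList ≠ [] := by
      fin_cases hp <;> simp
    obtain ⟨j, hj, hpre⟩ := (isIn_eq_exists _ _ hpne).mp hin'
    exact ⟨p.toList, List.mem_map_of_mem hp, j, hj, hpre⟩
  · rintro ⟨q, hq, j, hj, hpre⟩
    obtain ⟨p, hp, rfl⟩ := List.mem_map.mp hq
    refine ⟨p, hp, ?_⟩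
    have hpne : p.toList ≠ [] := by
      fin_cases hp <;> simp
    have : PySem.Chars.isIn p.toList L = true :=
      (isIn_eq_exists _ _ hpne).mpr ⟨j, hj, hpre⟩
    rw [← hlower] at this
    simpa [PySem.Str.isIn] using this

-- ===== VERDICT (by name: the statement is the Claim_ definition above) =====
theorem mentions_buyer_gap_py_spec : Claim_equal_mentions_buyer_gap_py := by
  intro text _
  exact mentions_buyer_gap_py_eq text
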